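-- pv_equiv track=rewrite | github.com/codeaddict0/pythonProject | main.py | lose_point_check
-- ===== SOURCE A (Python) =====
-- def lose_point_check(chosen_word,guess):
--     b = 0
--     for i in chosen_word:
--         if i == guess:
--             pass
--         else:
--             b += 1
--     if b == len(chosen_word):
--         return("lose point")
--     else:
--         pass
-- ===== SOURCE B (Python) =====
-- def lose_point_check(chosen_word, guess):
--     # Membership test over the characters: None iff some character equals guess.
--     # (list membership compares whole elements, so multi-char / empty guess
--     # never matches, exactly like A's per-character comparison.)
--     return None if guess in list(chosen_word) else "lose point"
-- ===== Notes on version B (the rewrite author's own statement) =====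
-- stated objective: simpler
-- what changed: Replaces the count-every-non-matching-character loop and length comparison with a single early-exiting membership test over the characters (None iff some character equals guess).
import Mathlib
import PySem

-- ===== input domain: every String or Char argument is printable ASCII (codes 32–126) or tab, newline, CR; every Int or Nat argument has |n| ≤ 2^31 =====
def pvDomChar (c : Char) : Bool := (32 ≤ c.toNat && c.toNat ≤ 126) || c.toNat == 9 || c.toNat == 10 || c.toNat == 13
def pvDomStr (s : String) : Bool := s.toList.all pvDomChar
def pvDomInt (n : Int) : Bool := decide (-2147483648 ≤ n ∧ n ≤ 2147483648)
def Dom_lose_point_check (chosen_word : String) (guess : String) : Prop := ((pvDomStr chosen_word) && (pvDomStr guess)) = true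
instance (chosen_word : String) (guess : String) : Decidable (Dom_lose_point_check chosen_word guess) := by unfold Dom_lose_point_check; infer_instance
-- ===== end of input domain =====

-- B replaces A's count-and-compare loop with a direct membership test over the characters (simpler).


-- ===== PORT A =====
-- A: b counts characters that differ from guess; "lose point" iff b == len(chosen_word).
def lose_point_check (chosen_word : String) (guess : String) : Option String :=
  let b := chosen_word.toList.foldl
    (fun b i => if String.ofList [i] = guess then b else b + 1) 0
  if b = chosen_word.toList.length then some "lose point" else none

-- ===== PORT B =====
-- B: None iff guess is a member of the character list (each char viewed as a 1-char string).
def lose_point_check_alt (chosen_word : String) (guess : String) : Option String :=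
  if (chosen_word.toList.map (fun c => String.ofList [c])).contains guess then none
  else some "lose point"

-- ===== PRECONDITION & SPEC =====
def Spec_lose_point_check (chosen_word : String) (guess : String) (out : Option String) : Prop := out = lose_point_check_alt chosen_word guess
instance (chosen_word : String) (guess : String) (out : Option String) : Decidable (Spec_lose_point_check chosen_word guess out) := by unfold Spec_lose_point_check; infer_instance

-- ===== CLAIM (what is proved, stated in full; the proofs are below) =====
def Claim_equal_lose_point_check : Prop := ∀ (chosen_word : String) (guess : String), Dom_lose_point_check chosen_word guess → Spec_lose_point_check chosen_word guess (lose_point_check chosen_word guess)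

-- ===== LEMMAS AND PROOFS =====

-- A's accumulator is the count of characters whose 1-char string differs from guess.
theorem lpc_foldl_count (g : String) (l : List Char) (b : Nat) :
    l.foldl (fun b i => if String.ofList [i] = g then b else b + 1) b
      = b + l.countP (fun i => !(String.ofList [i] = g : Bool)) := by
  induction l generalizing b with
  | nil => simp
  | cons c t ih =>
    simp only [List.foldl_cons, List.countP_cons]
    by_cases h : String.ofList [c] = g <;> simp [h, ih] <;> omega

theorem lose_point_check_eq (chosen_word guess : String) :
    lose_point_check chosen_word guess = lose_point_check_alt chosen_word guess := by
  unfold lose_point_check lose_point_check_alt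
  simp only [lpc_foldl_count, Nat.zero_add]
  by_cases hmem : guess ∈ chosen_word.toList.map (fun c => String.ofList [c])
  · -- some character matches: the count of non-matching chars is strictly below the length
    obtain ⟨i, hi, heq⟩ := List.mem_map.mp hmem
    have hne : chosen_word.toList.countP (fun i => !(String.ofList [i] = guess : Bool))
        ≠ chosen_word.toList.length := by
      intro heq'
      have := List.countP_eq_length.mp heq' i hi
      simp [heq] at this
    rw [if_neg hne, if_pos (List.contains_iff_mem.mpr hmem)]
  · -- no character matches: the count equals the full length
    have hall : chosen_word.toList.countP (fun i => !(String.ofList [i] = guess : Bool))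
        = chosen_word.toList.length := by
      apply List.countP_eq_length.mpr
      intro i hi
      simp only [Bool.not_eq_eq_eq_not, Bool.not_true, decide_eq_false_iff_not]
      intro heq; exact hmem (List.mem_map.mpr ⟨i, hi, heq⟩)
    rw [if_pos hall, if_neg (by simpa using (fun h => hmem (List.contains_iff_mem.mp h)))]

-- ===== VERDICT (by name: the statement is the Claim_ definition above) =====
theorem lose_point_check_spec : Claim_equal_lose_point_check := by
  intro cw g _
  unfold Spec_lose_point_check
  exact lose_point_check_eq cw g
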